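-- pv_equiv track=rewrite | github.com/Societal-Computing/google_maps_poi_search | live_busyness_extraction/main.py | _assign_rows_to_proxies
-- ===== SOURCE A (Python) =====
-- from typing import List, Dict, Any, Set, Optional
--
-- def _assign_rows_to_proxies(rows: List[Dict[str, Any]], proxies: List[str]) -> Dict[str, List[Dict[str, Any]]]:
--     """Evenly assign rows to proxies in round-robin fashion."""
--     assignment: Dict[str, List[Dict[str, Any]]] = {p: [] for p in proxies}
--     if not proxies:
--         return assignment
--     for idx, row in enumerate(rows):
--         proxy = proxies[idx % len(proxies)]
--         assignment[proxy].append(row)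
--     return assignment
-- ===== SOURCE B (Python) =====
-- def _assign_rows_to_proxies(rows, proxies):
--     """Evenly assign rows to proxies: one filtered pass of rows per distinct proxy."""
--     n = len(proxies)
--     if n == 0:
--         return {}
--     return {p: [row for i, row in enumerate(rows) if proxies[i % n] == p]
--             for p in dict.fromkeys(proxies)}
-- ===== Notes on version B (the rewrite author's own statement) =====
-- stated objective: alternative
-- what changed: A makes one round-robin pass over rows mutating a dict of lists; B builds the result as a dict comprehension over the distinct proxies, filtering the enumerated rows by residue class per key (no mutation, no incremental dict state).
import Mathlib
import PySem

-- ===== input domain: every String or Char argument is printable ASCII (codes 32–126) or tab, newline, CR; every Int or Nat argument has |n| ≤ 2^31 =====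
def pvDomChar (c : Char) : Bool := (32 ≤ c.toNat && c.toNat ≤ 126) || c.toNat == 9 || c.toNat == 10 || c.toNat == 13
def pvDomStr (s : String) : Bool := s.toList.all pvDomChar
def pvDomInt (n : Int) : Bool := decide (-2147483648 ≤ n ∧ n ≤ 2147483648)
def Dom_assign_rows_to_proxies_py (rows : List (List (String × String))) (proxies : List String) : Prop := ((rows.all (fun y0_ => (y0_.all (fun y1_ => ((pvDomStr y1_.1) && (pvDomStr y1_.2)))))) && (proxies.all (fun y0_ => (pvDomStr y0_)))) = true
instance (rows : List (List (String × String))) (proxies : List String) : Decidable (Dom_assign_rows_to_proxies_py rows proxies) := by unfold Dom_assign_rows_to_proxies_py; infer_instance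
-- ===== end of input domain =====

-- B replaces A's single mutating round-robin pass by a per-distinct-proxy filtered comprehension (alternative decomposition, same results).


-- ===== PORT A =====
-- assignment = {p: [] for p in proxies}; if not proxies: return assignment;
-- for idx, row in enumerate(rows): assignment[proxies[idx % len(proxies)]].append(row)
-- (proxies[idx % len] is always in range, and the key always present, so pyGetD/modify defaults are never reached)
def assign_rows_to_proxies_py (rows : List (List (String × String))) (proxies : List String) : List (String × List (List (String × String))) :=
  let assignment : PySem.Dict String (List (List (String × String))) :=
    proxies.foldl (fun d p => d.insert p []) PySem.Dict.empty
  if proxies = [] then assignment.items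
  else
    ((PySem.List.enumerate rows).foldl
      (fun d q =>
        d.modify (PySem.List.pyGetD proxies (PySem.Int.mod q.1 (proxies.length : Int)) "") []
          (fun l => l ++ [q.2]))
      assignment).items

-- ===== PORT B =====
-- n = len(proxies); if n == 0: return {};
-- return {p: [row for i, row in enumerate(rows) if proxies[i % n] == p] for p in dict.fromkeys(proxies)}
def assign_rows_to_proxies_py_alt (rows : List (List (String × String))) (proxies : List String) : List (String × List (List (String × String))) :=
  if proxies.length = 0 then []
  else
    (PySem.List.dedup proxies).map (fun p =>
      (p, (PySem.List.enumerate rows).filterMap (fun q =>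
        if PySem.List.pyGetD proxies (PySem.Int.mod q.1 (proxies.length : Int)) "" = p then some q.2 else none)))

-- ===== PRECONDITION & SPEC =====
def Spec_assign_rows_to_proxies_py (rows : List (List (String × String))) (proxies : List String) (out : List (String × List (List (String × String)))) : Prop := out = assign_rows_to_proxies_py_alt rows proxies
instance (rows : List (List (String × String))) (proxies : List String) (out : List (String × List (List (String × String)))) : Decidable (Spec_assign_rows_to_proxies_py rows proxies out) := by unfold Spec_assign_rows_to_proxies_py; infer_instance

-- ===== CLAIM (what is proved, stated in full; the proofs are below) =====
def Claim_equal_assign_rows_to_proxies_py : Prop := ∀ (rows : List (List (String × String))) (proxies : List String), Dom_assign_rows_to_proxies_py rows proxies → Spec_assign_rows_to_proxies_py rows proxies (assign_rows_to_proxies_py rows proxies)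

-- ===== LEMMAS AND PROOFS =====

-- folding constant-value inserts leaves every getD at that constant
lemma getD_foldl_insert_const {κ ν : Type} [BEq κ] [LawfulBEq κ] [DecidableEq κ]
    (l : List κ) (v : ν) (d : PySem.Dict κ ν) (k : κ) (h : d.getD k v = v) :
    (l.foldl (fun d p => d.insert p v) d).getD k v = v := by
  induction l generalizing d with
  | nil => exact h
  | cons a t ih =>
      simp only [List.foldl_cons]
      exact ih _ (by rw [PySem.Dict.getD_insert]; split_ifs <;> simp [h])

-- filter-then-project over the keyed copy equals a filterMap over the original list
lemma filter_map_key_eq_filterMap {α β : Type} [DecidableEq β]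
    (l : List α) (key : α → β) (snd : α → γ) (p : β) :
    (((l.map (fun q => (key q, snd q))).filter (fun r => r.1 == p)).map (·.2))
      = l.filterMap (fun q => if key q = p then some (snd q) else none) := by
  induction l with
  | nil => rfl
  | cons a t ih =>
      by_cases h : key a = p <;> simp [h, ih]

theorem assign_rows_to_proxies_py_spec : Claim_equal_assign_rows_to_proxies_py := by
  intro rows proxies _
  show assign_rows_to_proxies_py rows proxies = assign_rows_to_proxies_py_alt rows proxies
  unfold assign_rows_to_proxies_py assign_rows_to_proxies_py_alt
  by_cases hp : proxies = []
  · subst hp; simp [PySem.Dict.empty]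
  · have hn : proxies.length ≠ 0 := by simpa using hp
    have hnpos : (0 : Int) < (proxies.length : Int) := by
      exact_mod_cast Nat.pos_of_ne_zero hn
    simp only [hp, hn, if_false]
    set key : (Int × List (String × String)) → String :=
      fun q => PySem.List.pyGetD proxies (PySem.Int.mod q.1 (proxies.length : Int)) "" with hkey
    set l := PySem.List.enumerate rows with hl
    set d0 : PySem.Dict String (List (List (String × String))) :=
      proxies.foldl (fun d p => d.insert p []) PySem.Dict.empty with hd0
    -- keys of d0
    have hkeys0 : d0.keys = PySem.Set.ofList proxies := by
      rw [hd0, PySem.Dict.keys_foldl_insert]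
      simp [PySem.Set.update_nil_left]
    have hnd0 : d0.keys.Nodup := by
      rw [hkeys0]; exact PySem.Set.nodup_ofList proxies
    -- every key produced by the loop is a proxy
    have hkeymem : ∀ q : Int × List (String × String), key q ∈ proxies := by
      intro q
      apply PySem.List.pyGetD_mem
      constructor
      · calc -(proxies.length : Int) ≤ 0 := by omega
          _ ≤ _ := PySem.Int.mod_nonneg _ hnpos
      · exact PySem.Int.mod_lt _ hnpos
    -- final dict
    set dF := l.foldl (fun d q => d.modify (key q) [] (fun v => v ++ [q.2])) d0 with hdF
    have hkeysF : dF.keys = PySem.Set.ofList proxies := by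
      rw [hdF, PySem.Dict.keys_foldl_modify_key, hkeys0,
          PySem.Set.update_eq_append_filter]
      have : ((PySem.Set.ofList (l.map key)).filter
          (fun y => !(PySem.Set.contains (PySem.Set.ofList proxies) y))) = [] := by
        apply List.filter_eq_nil_iff.mpr
        intro y hy
        have hyp : y ∈ proxies := by
          rcases List.mem_map.mp ((PySem.Set.mem_ofList _ _).mp hy) with ⟨q, _, rfl⟩
          exact hkeymem q
        simpa using hyp
      rw [this, List.append_nil]
    have hndF : dF.keys.Nodup := by
      rw [hkeysF]; exact PySem.Set.nodup_ofList proxies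
    -- value at each key
    have hval : ∀ p : String, dF.getD p [] =
        l.filterMap (fun q => if key q = p then some q.2 else none) := by
      intro p
      have : dF = (l.map (fun q => (key q, q.2))).foldl
          (fun d r => d.modify r.1 [] (fun v => v ++ [r.2])) d0 := by
        rw [hdF, List.foldl_map]
      rw [this, PySem.Dict.getD_foldl_modify_append]
      rw [filter_map_key_eq_filterMap l key (·.2) p]
      have h0 : d0.getD p [] = [] := by
        rw [hd0]
        exact getD_foldl_insert_const proxies [] PySem.Dict.empty p (by simp)
      simp [h0]
    -- assemble
    rw [PySem.Dict.items_eq_map_keys dF hndF [], hkeysF, PySem.List.dedup_eq_ofList]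
    exact List.map_congr_left (fun p _ => by rw [hval p])

-- ===== VERDICT (by name: the statement is the Claim_ definition above) =====
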